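-- pv_equiv track=rewrite | github.com/nansy-fox/Tasks_Yandex | Task2.py | min_steps_to_equal
-- ===== SOURCE A (Python) =====
-- def min_steps_to_equal(arr, k):
--     n = len(arr)
--
--     if len(set(arr)) == 1:
--         return 0
--
--     if len(set(arr)) == n:
--         return -1
--
--     if k <= 0 or k > n:
--         return -1
--
--     from collections import Counter
--     counter = Counter(arr)
--     target = counter.most_common(1)[0][0]
--
--     positions = [i for i, x in enumerate(arr) if x == target]
--
--     min_steps = float('inf')
--
--     for pos in positions:
--         steps = 0
--         current_pos = pos
--
--         for i in range(n):
--             if arr[i] != target: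
--                 if current_pos < i:
--                     distance = i - current_pos
--                 else:
--                     distance = n - current_pos + i
--
--                 steps_for_this = (distance + k - 2) // (k - 1)
--                 steps = max(steps, steps_for_this)
--
--         min_steps = min(min_steps, steps)
--
--     return min_steps if min_steps != float('inf') else -1
-- ===== SOURCE B (Python) =====
-- def min_steps_to_equal(arr, k):
--     n = len(arr)
--     distinct = len(set(arr))
--     if distinct == 1:
--         return 0
--     if distinct == n:
--         return -1
--     if k <= 1 or k > n:
--         return -1
--
--     counts = {}
--     for x in arr:
--         counts[x] = counts.get(x, 0) + 1
--     target = max(counts, key=counts.get)  # first key attaining the max count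
--
--     # run = number of consecutive target entries immediately before the current
--     # index, circularly; seed it with the trailing run of the array
--     run = 0
--     j = n - 1
--     while j >= 0 and arr[j] == target:
--         run += 1
--         j -= 1
--
--     best = -1  # max over target positions of the run length just before them
--     for x in arr:
--         if x == target:
--             if run > best:
--                 best = run
--             run += 1
--         else:
--             run = 0
--
--     # the worst forward circular distance from the best target position is n-1-best
--     return (n - 1 - best + k - 2) // (k - 1)
-- ===== Notes on version B (the rewrite author's own statement) =====
-- stated objective: faster
-- what changed: A minimises, over every target position, an inner scan of all n indices (O(n^2)); B seeds a circular 'consecutive targets before me' run counter with the trailing run, takes the maximum run over target positions in one pass, and returns ceil((n-1-maxrun)/(k-1)) by one floor division (O(n)).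
-- crash fix: When k == 1 and arr is neither constant nor duplicate-free, A raises ZeroDivisionError at the (distance + k - 2) // (k - 1) step; B returns -1 (no progress is possible with k == 1). — e.g. on min_steps_to_equal([1, 1, 2], 1): A raises ZeroDivisionError, B returns -1
import Mathlib
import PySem

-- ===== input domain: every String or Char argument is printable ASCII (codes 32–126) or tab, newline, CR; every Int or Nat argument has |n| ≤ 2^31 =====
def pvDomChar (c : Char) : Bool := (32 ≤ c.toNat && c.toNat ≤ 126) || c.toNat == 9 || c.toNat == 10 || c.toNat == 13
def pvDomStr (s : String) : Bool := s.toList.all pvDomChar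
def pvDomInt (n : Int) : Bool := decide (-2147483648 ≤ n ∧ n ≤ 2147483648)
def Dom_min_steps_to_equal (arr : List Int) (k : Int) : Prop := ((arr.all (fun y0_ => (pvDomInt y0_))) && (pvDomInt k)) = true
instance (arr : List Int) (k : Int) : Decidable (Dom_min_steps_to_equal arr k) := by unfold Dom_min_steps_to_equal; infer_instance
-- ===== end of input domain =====

-- B replaces A's O(n^2) min-over-targets-of-inner-scan by one O(n) circular-run pass and a single floor division.

-- ===== PORT A =====
-- literal transliteration of A; float('inf') is ported as the Option sentinel none
def min_steps_to_equal (arr : List Int) (k : Int) : Int :=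
  let n : Int := arr.length
  if (PySem.Set.ofList arr).length = 1 then 0
  else if ((PySem.Set.ofList arr).length : Int) = n then -1
  else if k ≤ 0 ∨ n < k then -1
  else
    let counter := PySem.Dict.counter arr
    -- most_common(1)[0][0] = the first key attaining the maximal count (nlargest is stable)
    let target : Int :=
      (counter.items.foldl (fun b q => if b.2 < q.2 then q else b)
        (PySem.List.pyGetD counter.items 0 (0, 0))).1
    let positions : List Int :=
      ((PySem.List.enumerate arr 0).filter (fun p => p.2 == target)).map (fun p => p.1)
    let minSteps : Option Int :=
      positions.foldl (fun ms pos =>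
        let steps : Int :=
          (PySem.List.pyRange 0 n 1).foldl (fun steps i =>
            if PySem.List.pyGetD arr i 0 ≠ target then
              max steps (PySem.Int.floordiv ((if pos < i then i - pos else n - pos + i) + k - 2) (k - 1))
            else steps) 0
        some (ms.elim steps (fun m => min m steps))) none
    minSteps.elim (-1) (fun m => m)

-- ===== PORT B =====
-- the 'while j >= 0 and arr[j] == target' trailing-run loop of B (j = m - 1)
def trailRun (arr : List Int) (target : Int) : Nat → Int
  | 0 => 0
  | m + 1 => if arr.getD m 0 = target then 1 + trailRun arr target m else 0

def min_steps_to_equal_alt (arr : List Int) (k : Int) : Int :=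
  let n : Int := arr.length
  let distinct := (PySem.Set.ofList arr).length
  if distinct = 1 then 0
  else if (distinct : Int) = n then -1
  else if k ≤ 1 ∨ n < k then -1
  else
    let counts : PySem.Dict Int Int := arr.foldl (fun d x => d.modify x 0 (· + 1)) PySem.Dict.empty
    -- max(counts, key=counts.get): first key attaining the maximal count
    let target : Int :=
      counts.keys.foldl (fun b q => if counts.getD b 0 < counts.getD q 0 then q else b)
        (PySem.List.pyGetD counts.keys 0 0)
    let run0 : Int := trailRun arr target arr.length
    let st : Int × Int := arr.foldl (fun (st : Int × Int) (x : Int) =>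
      if x = target then ((if st.1 < st.2 then st.2 else st.1), st.2 + 1)
      else (st.1, 0)) (-1, run0)
    PySem.Int.floordiv (n - 1 - st.1 + k - 2) (k - 1)

-- ===== PRECONDITION & SPEC =====
-- Pre_ excludes only the inputs on which A raises ZeroDivisionError: k = 1 reached past
-- the early returns, i.e. k = 1 with arr neither constant nor duplicate-free.
def Pre_min_steps_to_equal (arr : List Int) (k : Int) : Prop :=
  (∀ x ∈ arr, ∀ y ∈ arr, x = y) ∨ arr.Nodup ∨ k ≠ 1
instance (arr : List Int) (k : Int) : Decidable (Pre_min_steps_to_equal arr k) := by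
  unfold Pre_min_steps_to_equal; infer_instance
def pvWitness_min_steps_to_equal : List Int × Int := ([1, 1, 2], 2)

-- On k = 1 with arr neither constant nor duplicate-free, A raises ZeroDivisionError; B returns -1.
def Raises_min_steps_to_equal (arr : List Int) (k : Int) : Prop :=
  k = 1 ∧ ¬ (∀ x ∈ arr, ∀ y ∈ arr, x = y) ∧ ¬ arr.Nodup
instance (arr : List Int) (k : Int) : Decidable (Raises_min_steps_to_equal arr k) := by
  unfold Raises_min_steps_to_equal; infer_instance
def pvRaiseWitness_min_steps_to_equal : List Int × Int := ([1, 1, 2], 1)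
def pvRaiseWitnessOut_min_steps_to_equal : Int := -1

def Spec_min_steps_to_equal (arr : List Int) (k : Int) (out : Int) : Prop := out = min_steps_to_equal_alt arr k
instance (arr : List Int) (k : Int) (out : Int) : Decidable (Spec_min_steps_to_equal arr k out) := by unfold Spec_min_steps_to_equal; infer_instance

-- ===== CLAIM (what is proved, stated in full; the proofs are below) =====
def Claim_equal_min_steps_to_equal : Prop := ∀ (arr : List Int) (k : Int), Dom_min_steps_to_equal arr k → Pre_min_steps_to_equal arr k → Spec_min_steps_to_equal arr k (min_steps_to_equal arr k)
def Claim_raises_min_steps_to_equal : Prop := (∀ (arr : List Int) (k : Int), Dom_min_steps_to_equal arr k → Raises_min_steps_to_equal arr k → ¬ Pre_min_steps_to_equal arr k) ∧ (Dom_min_steps_to_equal (pvRaiseWitness_min_steps_to_equal.1) (pvRaiseWitness_min_steps_to_equal.2) ∧ Raises_min_steps_to_equal (pvRaiseWitness_min_steps_to_equal.1) (pvRaiseWitness_min_steps_to_equal.2) ∧ min_steps_to_equal_alt (pvRaiseWitness_min_steps_to_equal.1) (pvRaiseWitness_min_steps_to_equal.2) = pvRaiseWitnessOut_min_steps_to_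equal)

-- ===== LEMMAS AND PROOFS =====

-- ---- proof-side abbreviations ----
def fB (k x : Int) : Int := PySem.Int.floordiv (x + k - 2) (k - 1)
def distA (n p i : Int) : Int := if p < i then i - p else n - p + i
def prevIdx (n j : Nat) : Nat := if j = 0 then n - 1 else j - 1
-- count of consecutive target entries at positions j, j-1 (circularly), …, up to m steps
def cback (arr : List Int) (t : Int) : Nat → Nat → Int
  | _, 0 => 0
  | j, m + 1 => if arr.getD j 0 = t then 1 + cback arr t (prevIdx arr.length j) m else 0
-- position b steps back (circularly) from j
def backN (n : Nat) : Nat → Nat → Nat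
  | j, 0 => j
  | j, b + 1 => backN n (prevIdx n j) b
-- circular run of target entries immediately before position p
def cC (arr : List Int) (t : Int) (p : Nat) : Int := cback arr t (prevIdx arr.length p) (arr.length - 1)
-- the run value of B's scan before processing index i
def runR (arr : List Int) (t : Int) : Nat → Int
  | 0 => trailRun arr t arr.length
  | i + 1 => if arr.getD i 0 = t then runR arr t i + 1 else 0

-- ---- arithmetic ----
theorem fB_mono (k x y : Int) (hk : 2 ≤ k) (h : x ≤ y) : fB k x ≤ fB k y := by
  unfold fB
  rw [PySem.Int.floordiv_eq_ediv_of_pos (by omega), PySem.Int.floordiv_eq_ediv_of_pos (by omega)]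
  exact Int.ediv_le_ediv (by omega) (by omega)

theorem fB_pos (k x : Int) (hk : 2 ≤ k) (hx : 1 ≤ x) : 1 ≤ fB k x := by
  unfold fB
  rw [PySem.Int.le_floordiv_iff_mul_le (by omega)]
  omega

-- ---- generic fold lemmas ----
theorem foldmin_le_init (F : Int → Int) (l : List Int) (a : Int) :
    l.foldl (fun m q => min m (F q)) a ≤ a := by
  induction l generalizing a with
  | nil => simp
  | cons x xs ih => exact le_trans (ih (min a (F x))) (min_le_left _ _)

theorem foldmin_le_mem (F : Int → Int) (l : List Int) (a : Int) (p : Int) (hp : p ∈ l) :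
    l.foldl (fun m q => min m (F q)) a ≤ F p := by
  induction l generalizing a with
  | nil => cases hp
  | cons x xs ih =>
    rcases List.mem_cons.mp hp with h | h
    · subst h
      exact le_trans (foldmin_le_init F xs (min a (F p))) (min_le_right _ _)
    · exact ih (min a (F x)) h

theorem foldmin_lb (F : Int → Int) (l : List Int) (a M : Int) (ha : M ≤ a)
    (hl : ∀ p ∈ l, M ≤ F p) : M ≤ l.foldl (fun m q => min m (F q)) a := by
  induction l generalizing a with
  | nil => simpa
  | cons x xs ih =>
    refine ih _ (le_min ha (hl x List.mem_cons_self)) ?_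
    exact fun p hp => hl p (List.mem_cons_of_mem _ hp)

theorem foldmaxg_init_le (Q : Int → Prop) [DecidablePred Q] (g : Int → Int) (l : List Int) (a : Int) :
    a ≤ l.foldl (fun s i => if Q i then max s (g i) else s) a := by
  induction l generalizing a with
  | nil => simp
  | cons x xs ih =>
    refine le_trans ?_ (ih (if Q x then max a (g x) else a))
    split <;> simp

theorem foldmaxg_mem (Q : Int → Prop) [DecidablePred Q] (g : Int → Int) (l : List Int) (a : Int)
    (p : Int) (hp : p ∈ l) (hQ : Q p) :
    g p ≤ l.foldl (fun s i => if Q i then max s (g i) else s) a := by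
  induction l generalizing a with
  | nil => cases hp
  | cons x xs ih =>
    rcases List.mem_cons.mp hp with h | h
    · subst h
      refine le_trans ?_ (foldmaxg_init_le Q g xs _)
      simp [if_pos hQ]
    · exact ih _ h

theorem foldmaxg_ub (Q : Int → Prop) [DecidablePred Q] (g : Int → Int) (l : List Int) (a M : Int)
    (ha : a ≤ M) (hub : ∀ i ∈ l, Q i → g i ≤ M) :
    l.foldl (fun s i => if Q i then max s (g i) else s) a ≤ M := by
  induction l generalizing a with
  | nil => simpa
  | cons x xs ih =>
    refine ih _ ?_ (fun i hi hq => hub i (List.mem_cons_of_mem _ hi) hq)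
    by_cases hx : Q x
    · simpa [hx] using max_le ha (hub x List.mem_cons_self hx)
    · simpa [hx] using ha

theorem optfold_eq (F : Int → Int) (l : List Int) (a : Int) :
    l.foldl (fun ms pos => some (ms.elim (F pos) (fun m => min m (F pos)))) (some a)
    = some (l.foldl (fun m pos => min m (F pos)) a) := by
  induction l generalizing a with
  | nil => rfl
  | cons x xs ih => exact ih (min a (F x))

theorem argmax_pair (f : Int → Int) (l : List Int) (b : Int) :
    ((l.map (fun q => (q, f q))).foldl (fun b q => if b.2 < q.2 then q else b) (b, f b)).1
    = l.foldl (fun b q => if f b < f q then q else b) b := by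
  induction l generalizing b with
  | nil => rfl
  | cons x xs ih =>
    simp only [List.map_cons, List.foldl_cons]
    rw [show ((if (b, f b).2 < (x, f x).2 then (x, f x) else (b, f b)) : Int × Int)
        = ((if f b < f x then x else b), f (if f b < f x then x else b)) by
      split <;> simp_all]
    exact ih _

theorem foldl_index {α : Type} (arr : List Int) (g : α → Int → α) (init : α) :
    arr.foldl g init = (List.range arr.length).foldl (fun s j => g s (arr.getD j 0)) init := by
  induction arr generalizing init with
  | nil => rfl
  | cons x xs ih =>
    simp only [List.foldl_cons, List.length_cons, List.range_succ_eq_map, List.foldl_map,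
      List.getD_cons_zero, List.getD_cons_succ]
    exact ih (g init x)

-- ---- cback / backN facts ----
theorem cback_succ_pos (arr : List Int) (t : Int) (j m : Nat) (h : arr.getD j 0 = t) :
    cback arr t j (m + 1) = 1 + cback arr t (prevIdx arr.length j) m := by
  simp only [cback]
  rw [if_pos h]

theorem cback_succ_neg (arr : List Int) (t : Int) (j m : Nat) (h : ¬ arr.getD j 0 = t) :
    cback arr t j (m + 1) = 0 := by
  simp only [cback]
  rw [if_neg h]

theorem prevIdx_zero (n : Nat) : prevIdx n 0 = n - 1 := by simp [prevIdx]

theorem prevIdx_pos (n j : Nat) (h : 0 < j) : prevIdx n j = j - 1 := by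
  unfold prevIdx
  rw [if_neg (by omega)]

theorem cb_nonneg (arr : List Int) (t : Int) (j m : Nat) : 0 ≤ cback arr t j m := by
  induction m generalizing j with
  | zero => simp [cback]
  | succ m ih =>
    by_cases h : arr.getD j 0 = t
    · have := ih (prevIdx arr.length j)
      rw [cback_succ_pos arr t j m h]
      omega
    · rw [cback_succ_neg arr t j m h]

theorem cb_le (arr : List Int) (t : Int) (j m : Nat) : cback arr t j m ≤ (m : Int) := by
  induction m generalizing j with
  | zero => simp [cback]
  | succ m ih =>
    by_cases h : arr.getD j 0 = t
    · have := ih (prevIdx arr.length j)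
      rw [cback_succ_pos arr t j m h]
      push_cast
      omega
    · rw [cback_succ_neg arr t j m h]
      positivity

theorem cb_target (arr : List Int) (t : Int) (j m : Nat) (b : Nat)
    (hb : (b : Int) < cback arr t j m) : arr.getD (backN arr.length j b) 0 = t := by
  induction m generalizing j b with
  | zero => simp [cback] at hb; omega
  | succ m ih =>
    by_cases h : arr.getD j 0 = t
    · rw [cback_succ_pos arr t j m h] at hb
      cases b with
      | zero => simpa [backN] using h
      | succ b =>
        have hb' : (b : Int) < cback arr t (prevIdx arr.length j) m := by push_cast at hb; omega
        simpa [backN] using ih (prevIdx arr.length j) b hb'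
    · rw [cback_succ_neg arr t j m h] at hb
      omega

theorem cb_stop (arr : List Int) (t : Int) (j m : Nat) (h : cback arr t j m < (m : Int)) :
    arr.getD (backN arr.length j (cback arr t j m).toNat) 0 ≠ t := by
  induction m generalizing j with
  | zero => simp [cback] at h
  | succ m ih =>
    by_cases ht : arr.getD j 0 = t
    · rw [cback_succ_pos arr t j m ht] at h ⊢
      have h' : cback arr t (prevIdx arr.length j) m < (m : Int) := by push_cast at h; omega
      have hnn := cb_nonneg arr t (prevIdx arr.length j) m
      have e : (1 + cback arr t (prevIdx arr.length j) m).toNat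
          = (cback arr t (prevIdx arr.length j) m).toNat + 1 := by omega
      have := ih (prevIdx arr.length j) h'
      rw [e]
      simpa [backN] using this
    · rw [cback_succ_neg arr t j m ht]
      simpa [backN] using ht

theorem cb_sat (arr : List Int) (t : Int) (j m : Nat) :
    cback arr t j (m + 1) = cback arr t j m ∨ cback arr t j (m + 1) = (m : Int) + 1 := by
  induction m generalizing j with
  | zero =>
    by_cases ht : arr.getD j 0 = t
    · right
      rw [cback_succ_pos arr t j 0 ht]
      simp [cback]
    · left
      rw [cback_succ_neg arr t j 0 ht]
      simp [cback]
  | succ m ih =>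
    by_cases ht : arr.getD j 0 = t
    · rw [cback_succ_pos arr t j (m + 1) ht, cback_succ_pos arr t j m ht]
      rcases ih (prevIdx arr.length j) with h | h
      · left; omega
      · right; push_cast; omega
    · left
      rw [cback_succ_neg arr t j (m + 1) ht, cback_succ_neg arr t j m ht]

theorem backN_mod (n j b : Nat) (hn : 0 < n) (hj : j < n) (hb : b ≤ n) :
    backN n j b = (j + n - b) % n := by
  induction b generalizing j with
  | zero =>
    simp only [backN, Nat.sub_zero, Nat.add_mod_right]
    exact (Nat.mod_eq_of_lt hj).symm
  | succ b ih =>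
    simp only [backN]
    rcases Nat.eq_zero_or_pos j with h0 | h0
    · subst h0
      rw [prevIdx_zero, ih (n - 1) (by omega) (by omega)]
      have e : n - 1 + n - b = (0 + n - (b + 1)) + n := by omega
      rw [e, Nat.add_mod_right]
    · rw [prevIdx_pos n j h0, ih (j - 1) (by omega) (by omega)]
      have e : j - 1 + n - b = j + n - (b + 1) := by omega
      rw [e]

theorem backN_prev (n p b : Nat) (hn : 0 < n) (hp : p < n) (hb : b + 1 ≤ n) :
    backN n (prevIdx n p) b = (p + n - (b + 1)) % n := by
  rcases Nat.eq_zero_or_pos p with h0 | h0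
  · subst h0
    rw [prevIdx_zero, backN_mod n (n - 1) b hn (by omega) (by omega)]
    have e : n - 1 + n - b = (0 + n - (b + 1)) + n := by omega
    rw [e, Nat.add_mod_right]
  · rw [prevIdx_pos n p h0, backN_mod n (p - 1) b hn (by omega) (by omega)]
    have e : p - 1 + n - b = p + n - (b + 1) := by omega
    rw [e]

theorem c_le_sub_two (arr : List Int) (t : Int) (p : Nat)
    (hEx : ∃ q, q < arr.length ∧ arr.getD q 0 ≠ t)
    (hp : p < arr.length) (hpt : arr.getD p 0 = t) :
    cC arr t p ≤ (arr.length : Int) - 2 := by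
  set n := arr.length with hn
  obtain ⟨q, hq, hqt⟩ := hEx
  have hpq : p ≠ q := by intro h; exact hqt (h ▸ hpt)
  have hn2 : 2 ≤ n := by omega
  have hle : cback arr t (prevIdx n p) (n - 1) ≤ ((n - 1 : Nat) : Int) :=
    cb_le arr t (prevIdx n p) (n - 1)
  by_contra hgt
  push_neg at hgt
  unfold cC at hgt
  rw [← hn] at hgt
  have hb : ∃ b : Nat, b + 1 ≤ n ∧ (b : Int) < cback arr t (prevIdx n p) (n - 1) ∧
      (p + n - (b + 1)) % n = q := by
    rcases Nat.lt_or_ge q p with hqp | hqp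
    · refine ⟨p - q - 1, by omega, by omega, ?_⟩
      have e : p + n - (p - q - 1 + 1) = q + n := by omega
      rw [e, Nat.add_mod_right, Nat.mod_eq_of_lt hq]
    · have hqp' : p < q := by omega
      refine ⟨p + n - q - 1, by omega, by omega, ?_⟩
      have e : p + n - (p + n - q - 1 + 1) = q := by omega
      rw [e, Nat.mod_eq_of_lt hq]
  obtain ⟨b, hb1, hb2, hb3⟩ := hb
  have htar := cb_target arr t (prevIdx n p) (n - 1) b hb2
  rw [backN_prev n p b (by omega) hp hb1, hb3] at htar
  exact hqt htar

theorem dist_attained (arr : List Int) (t : Int) (p : Nat)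
    (hEx : ∃ q, q < arr.length ∧ arr.getD q 0 ≠ t)
    (hp : p < arr.length) (hpt : arr.getD p 0 = t) :
    ∃ i : Nat, i < arr.length ∧ arr.getD i 0 ≠ t ∧
      distA (arr.length : Int) (p : Int) (i : Int) = (arr.length : Int) - 1 - cC arr t p := by
  set n := arr.length with hn
  obtain ⟨q, hq, hqt⟩ := hEx
  have hpq : p ≠ q := by intro h; exact hqt (h ▸ hpt)
  have hn2 : 2 ≤ n := by omega
  have hc0 : 0 ≤ cC arr t p := cb_nonneg arr t (prevIdx n p) (n - 1)
  have hc2 : cC arr t p ≤ (n : Int) - 2 := c_le_sub_two arr t p ⟨q, hq, hqt⟩ hp hpt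
  have hlt : cback arr t (prevIdx n p) (n - 1) < ((n - 1 : Nat) : Int) := by
    unfold cC at hc2
    rw [← hn] at hc2
    push_cast
    omega
  have hstop := cb_stop arr t (prevIdx n p) (n - 1) hlt
  set c := cback arr t (prevIdx n p) (n - 1) with hcdef
  have hceq : cC arr t p = c := rfl
  rw [backN_prev n p c.toNat (by omega) hp (by omega)] at hstop
  set d := c.toNat + 1 with hd
  refine ⟨(p + n - d) % n, Nat.mod_lt _ (by omega), hstop, ?_⟩
  rw [hceq]
  by_cases hdp : d ≤ p
  · have hi0 : (p + n - d) % n = p - d := by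
      have e : p + n - d = (p - d) + n := by omega
      rw [e, Nat.add_mod_right, Nat.mod_eq_of_lt (by omega)]
    rw [hi0]
    unfold distA
    rw [if_neg (by omega)]
    omega
  · have hi0 : (p + n - d) % n = p + n - d := Nat.mod_eq_of_lt (by omega)
    rw [hi0]
    unfold distA
    rw [if_pos (by omega)]
    omega

theorem dist_ub (arr : List Int) (t : Int) (p : Nat)
    (hp : p < arr.length) (hpt : arr.getD p 0 = t) (i : Nat) (hi : i < arr.length)
    (hit : arr.getD i 0 ≠ t) :
    distA (arr.length : Int) (p : Int) (i : Int) ≤ (arr.length : Int) - 1 - cC arr t p := by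
  set n := arr.length with hn
  have hnn : 0 < n := by omega
  have hc0 : 0 ≤ cC arr t p := cb_nonneg arr t (prevIdx n p) (n - 1)
  rcases lt_trichotomy i p with hip | hip | hip
  · by_contra hcon
    push_neg at hcon
    have hdist : distA (n : Int) (p : Int) (i : Int) = (n : Int) - p + i := by
      unfold distA
      rw [if_neg (by omega)]
    rw [hdist] at hcon
    have hb2 : ((p - i - 1 : Nat) : Int) < cback arr t (prevIdx n p) (n - 1) := by
      unfold cC at hcon
      rw [← hn] at hcon
      omega
    have htar := cb_target arr t (prevIdx n p) (n - 1) (p - i - 1) hb2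
    rw [backN_prev n p (p - i - 1) hnn hp (by omega)] at htar
    have he : (p + n - (p - i - 1 + 1)) % n = i := by
      have e : p + n - (p - i - 1 + 1) = i + n := by omega
      rw [e, Nat.add_mod_right, Nat.mod_eq_of_lt hi]
    rw [he] at htar
    exact hit htar
  · exact absurd (hip ▸ hpt) hit
  · by_contra hcon
    push_neg at hcon
    have hdist : distA (n : Int) (p : Int) (i : Int) = (i : Int) - p := by
      unfold distA
      rw [if_pos (by omega)]
    rw [hdist] at hcon
    have hb2 : ((p + n - i - 1 : Nat) : Int) < cback arr t (prevIdx n p) (n - 1) := by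
      unfold cC at hcon
      rw [← hn] at hcon
      omega
    have htar := cb_target arr t (prevIdx n p) (n - 1) (p + n - i - 1) hb2
    rw [backN_prev n p (p + n - i - 1) hnn hp (by omega)] at htar
    have he : (p + n - (p + n - i - 1 + 1)) % n = i := by
      have e : p + n - (p + n - i - 1 + 1) = i := by omega
      rw [e, Nat.mod_eq_of_lt hi]
    rw [he] at htar
    exact hit htar

theorem trailRun_succ_pos (arr : List Int) (t : Int) (m : Nat) (h : arr.getD m 0 = t) :
    trailRun arr t (m + 1) = 1 + trailRun arr t m := by
  simp only [trailRun]
  rw [if_pos h]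

theorem trailRun_succ_neg (arr : List Int) (t : Int) (m : Nat) (h : ¬ arr.getD m 0 = t) :
    trailRun arr t (m + 1) = 0 := by
  simp only [trailRun]
  rw [if_neg h]

theorem runR_succ (arr : List Int) (t : Int) (m : Nat) :
    runR arr t (m + 1) = if arr.getD m 0 = t then runR arr t m + 1 else 0 := by
  simp only [runR]

theorem trail_eq_cback (arr : List Int) (t : Int) :
    ∀ m, 1 ≤ m → m ≤ arr.length → (∃ q, q < m ∧ arr.getD q 0 ≠ t) →
      ∀ fuel, m - 1 ≤ fuel → cback arr t (m - 1) fuel = trailRun arr t m := by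
  intro m
  induction m with
  | zero => omega
  | succ m ih =>
    intro _ hmn hEx fuel hfuel
    rcases Nat.eq_zero_or_pos m with hm0 | hm0
    · subst hm0
      obtain ⟨q, hq, hqt⟩ := hEx
      have hq0 : q = 0 := by omega
      subst hq0
      rw [trailRun_succ_neg arr t 0 hqt]
      cases fuel with
      | zero => simp [cback]
      | succ f => exact cback_succ_neg arr t 0 f hqt
    · cases fuel with
      | zero => omega
      | succ f =>
        have e1 : (m + 1) - 1 = m := rfl
        rw [e1]
        by_cases ht : arr.getD m 0 = t
        · have hEx' : ∃ q, q < m ∧ arr.getD q 0 ≠ t := by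
            obtain ⟨q, hq, hqt⟩ := hEx
            have hqm : q ≠ m := fun h => hqt (h ▸ ht)
            exact ⟨q, by omega, hqt⟩
          rw [cback_succ_pos arr t m f ht, trailRun_succ_pos arr t m ht]
          rw [prevIdx_pos arr.length m hm0]
          rw [ih hm0 (by omega) hEx' f (by omega)]
        · rw [cback_succ_neg arr t m f ht, trailRun_succ_neg arr t m ht]

theorem runR_eq_cC (arr : List Int) (t : Int)
    (hEx : ∃ q, q < arr.length ∧ arr.getD q 0 ≠ t) :
    ∀ m, m ≤ arr.length → runR arr t m = cC arr t m := by
  intro m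
  induction m with
  | zero =>
    intro _
    have hn1 : 1 ≤ arr.length := by
      obtain ⟨q, hq, -⟩ := id hEx
      omega
    show trailRun arr t arr.length = cC arr t 0
    unfold cC
    rw [prevIdx_zero]
    exact (trail_eq_cback arr t arr.length hn1 le_rfl hEx (arr.length - 1) le_rfl).symm
  | succ m ih =>
    intro hm
    have hmn : m < arr.length := by omega
    rw [runR_succ]
    by_cases ht : arr.getD m 0 = t
    · rw [if_pos ht]
      have hcm := ih (by omega)
      obtain ⟨q, hq, hqt⟩ := hEx
      have hqm : q ≠ m := fun h => hqt (h ▸ ht)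
      have hn2 : 2 ≤ arr.length := by omega
      have hc2 : cC arr t m ≤ (arr.length : Int) - 2 :=
        c_le_sub_two arr t m ⟨q, hq, hqt⟩ hmn ht
      have e2 : arr.length - 1 = (arr.length - 2) + 1 := by omega
      unfold cC
      rw [prevIdx_pos arr.length (m + 1) (by omega), Nat.add_sub_cancel]
      rw [e2, cback_succ_pos arr t m (arr.length - 2) ht]
      rcases cb_sat arr t (prevIdx arr.length m) (arr.length - 2) with hsat | hsat
      · rw [hcm]
        unfold cC
        rw [e2, hsat]
        ring
      · exfalso
        have hceq : cC arr t m = ((arr.length - 2 : Nat) : Int) + 1 := by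
          unfold cC
          rw [e2]
          exact hsat
        omega
    · rw [if_neg ht]
      unfold cC
      rw [prevIdx_pos arr.length (m + 1) (by omega), Nat.add_sub_cancel]
      rcases Nat.eq_zero_or_pos (arr.length - 1) with h0 | h0
      · rw [h0]
        simp [cback]
      · rw [show arr.length - 1 = (arr.length - 1 - 1) + 1 from by omega]
        exact (cback_succ_neg arr t m (arr.length - 1 - 1) ht).symm


-- ---- target selection: A's most_common(1) equals B's max(counts, key=counts.get) ----
theorem argmax_mem (f : Int → Int) (l : List Int) (b : Int) :
    l.foldl (fun b q => if f b < f q then q else b) b = b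
    ∨ l.foldl (fun b q => if f b < f q then q else b) b ∈ l := by
  induction l generalizing b with
  | nil => left; rfl
  | cons x xs ih =>
    rcases ih (if f b < f x then x else b) with h | h
    · by_cases hc : f b < f x
      · right
        rw [List.foldl_cons, h, if_pos hc]
        exact List.mem_cons_self
      · left
        rw [List.foldl_cons, h, if_neg hc]
    · right
      exact List.mem_cons_of_mem _ h

theorem target_eq (arr : List Int) :
    ((PySem.Dict.counter arr : PySem.Dict Int Int).items.foldl
        (fun b q => if b.2 < q.2 then q else b)
        (PySem.List.pyGetD (PySem.Dict.counter arr : PySem.Dict Int Int).items 0 (0, 0))).1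
    = (PySem.Dict.counter arr : PySem.Dict Int Int).keys.foldl
        (fun b q => if (PySem.Dict.counter arr).getD b 0 < (PySem.Dict.counter arr).getD q 0 then q else b)
        (PySem.List.pyGetD (PySem.Dict.counter arr : PySem.Dict Int Int).keys 0 0) := by
  rw [PySem.Dict.items_counter, PySem.Dict.keys_counter]
  simp only [PySem.Dict.getD_counter, PySem.List.pyGetD_zero]
  cases hsl : PySem.Set.ofList arr with
  | nil => rfl
  | cons y rest =>
    simp only [List.map_cons, List.getD_cons_zero, List.foldl_cons]
    rw [if_neg (lt_irrefl _), if_neg (lt_irrefl _)]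
    exact argmax_pair (fun q => (arr.count q : Int)) rest y

theorem target_mem (arr : List Int) (hne : arr ≠ []) :
    ((PySem.Dict.counter arr : PySem.Dict Int Int).items.foldl
        (fun b q => if b.2 < q.2 then q else b)
        (PySem.List.pyGetD (PySem.Dict.counter arr : PySem.Dict Int Int).items 0 (0, 0))).1 ∈ arr := by
  rw [PySem.Dict.items_counter]
  have hsne : PySem.Set.ofList arr ≠ [] := by
    intro h
    have := (PySem.Set.mem_ofList arr (arr.head hne)).mpr (List.head_mem hne)
    rw [h] at this
    cases this
  cases hsl : PySem.Set.ofList arr with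
  | nil => exact absurd hsl hsne
  | cons y rest =>
    simp only [PySem.List.pyGetD_zero, List.map_cons, List.getD_cons_zero, List.foldl_cons]
    rw [if_neg (lt_irrefl _)]
    rw [argmax_pair (fun q => (arr.count q : Int)) rest y]
    rcases argmax_mem (fun q => (arr.count q : Int)) rest y with h | h
    · rw [h]
      exact (PySem.Set.mem_ofList arr y).mp (hsl ▸ List.mem_cons_self)
    · exact (PySem.Set.mem_ofList arr _).mp (hsl ▸ List.mem_cons_of_mem _ h)

theorem two_distinct (arr : List Int) (h1 : (PySem.Set.ofList arr).length ≠ 1) (hne : arr ≠ []) :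
    ∃ x ∈ arr, ∃ y ∈ arr, x ≠ y := by
  have hmem : arr.head hne ∈ PySem.Set.ofList arr :=
    (PySem.Set.mem_ofList _ _).mpr (List.head_mem hne)
  have hnd := PySem.Set.nodup_ofList (xs := arr)
  cases h : PySem.Set.ofList arr with
  | nil => rw [h] at hmem; cases hmem
  | cons x rest =>
    cases rest with
    | nil => rw [h] at h1; simp at h1
    | cons y rest' =>
      rw [h] at hnd
      have hxy : x ≠ y := by
        have h' := List.nodup_cons.mp hnd
        intro he
        exact h'.1 (he ▸ List.mem_cons_self)
      have hx : x ∈ arr := (PySem.Set.mem_ofList _ _).mp (h ▸ List.mem_cons_self)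
      have hy : y ∈ arr := (PySem.Set.mem_ofList _ _).mp
        (h ▸ List.mem_cons_of_mem _ List.mem_cons_self)
      exact ⟨x, hx, y, hy, hxy⟩

-- ---- positions list of A ----
theorem mem_positions (arr : List Int) (t x : Int) :
    x ∈ ((PySem.List.enumerate arr 0).filter (fun p => p.2 == t)).map (fun p => p.1)
    ↔ ∃ j : Nat, j < arr.length ∧ x = (j : Int) ∧ arr.getD j 0 = t := by
  simp only [List.mem_map, List.mem_filter, PySem.List.mem_enumerate_iff]
  constructor
  · rintro ⟨⟨i, v⟩, ⟨⟨j, hj, he⟩, hv⟩, rfl⟩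
    cases he
    refine ⟨j, hj, by simp, ?_⟩
    rw [List.getD_eq_getElem _ _ hj]
    simpa using (beq_iff_eq).mp hv
  · rintro ⟨j, hj, rfl, hjt⟩
    refine ⟨((j : Int), arr[j]), ⟨⟨j, hj, by simp⟩, ?_⟩, rfl⟩
    rw [List.getD_eq_getElem _ _ hj] at hjt
    simpa using hjt

-- ---- A's inner loop equals fB of the worst circular distance ----
theorem inner_eq (arr : List Int) (t k : Int) (hk : 2 ≤ k)
    (hEx : ∃ q, q < arr.length ∧ arr.getD q 0 ≠ t)
    (p : Nat) (hp : p < arr.length) (hpt : arr.getD p 0 = t) :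
    (PySem.List.pyRange 0 (arr.length : Int) 1).foldl (fun steps i =>
        if PySem.List.pyGetD arr i 0 ≠ t then
          max steps (PySem.Int.floordiv
            ((if (p : Int) < i then i - (p : Int) else (arr.length : Int) - (p : Int) + i) + k - 2)
            (k - 1))
        else steps) 0
    = fB k ((arr.length : Int) - 1 - cC arr t p) := by
  have hc2 : cC arr t p ≤ (arr.length : Int) - 2 := c_le_sub_two arr t p hEx hp hpt
  have hM1 : (1 : Int) ≤ (arr.length : Int) - 1 - cC arr t p := by omega
  have hfM : (1 : Int) ≤ fB k ((arr.length : Int) - 1 - cC arr t p) := fB_pos _ _ hk hM1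
  have hget : ∀ i : Int, 0 ≤ i → i < (arr.length : Int) →
      PySem.List.pyGetD arr i 0 = arr.getD i.toNat 0 := by
    intro i h0 hl
    rw [PySem.List.pyGetD_eq_getElem arr 0 h0 (by simpa using hl)]
    exact (List.getD_eq_getElem arr 0 (n := i.toNat) (by omega)).symm
  apply le_antisymm
  · refine foldmaxg_ub (fun i => PySem.List.pyGetD arr i 0 ≠ t)
      (fun i => PySem.Int.floordiv
        ((if (p : Int) < i then i - (p : Int) else (arr.length : Int) - (p : Int) + i) + k - 2)
        (k - 1)) _ _ _ (by omega) ?_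
    intro i hi hQ
    rcases (PySem.List.mem_pyRange_one).mp hi with ⟨h0, hl⟩
    have hub := dist_ub arr t p hp hpt i.toNat (by omega) (by rw [← hget i h0 hl]; exact hQ)
    have hcast : ((i.toNat : Nat) : Int) = i := Int.toNat_of_nonneg h0
    rw [hcast] at hub
    unfold distA at hub
    exact le_trans (fB_mono k _ _ hk hub) (fB_mono k _ _ hk (le_refl _))
  · obtain ⟨i0, hi0, hi0t, hdist⟩ := dist_attained arr t p hEx hp hpt
    have hmem : ((i0 : Int)) ∈ PySem.List.pyRange 0 (arr.length : Int) 1 :=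
      (PySem.List.mem_pyRange_one).mpr ⟨by omega, by omega⟩
    have hQ : PySem.List.pyGetD arr (i0 : Int) 0 ≠ t := by
      rw [hget (i0 : Int) (by omega) (by omega)]
      simpa using hi0t
    have := foldmaxg_mem (fun i => PySem.List.pyGetD arr i 0 ≠ t)
      (fun i => PySem.Int.floordiv
        ((if (p : Int) < i then i - (p : Int) else (arr.length : Int) - (p : Int) + i) + k - 2)
        (k - 1)) _ 0 _ hmem hQ
    refine le_trans (le_of_eq ?_) this
    unfold distA at hdist
    unfold fB
    rw [← hdist]

-- ---- B's scan: the best accumulator is the maximum circular run over target positions ----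
theorem scan_spec (arr : List Int) (t : Int)
    (hEx : ∃ q, q < arr.length ∧ arr.getD q 0 ≠ t)
    (hT : ∃ p, p < arr.length ∧ arr.getD p 0 = t) :
    (∀ p, p < arr.length → arr.getD p 0 = t →
      cC arr t p ≤ (arr.foldl (fun (st : Int × Int) x =>
        if x = t then ((if st.1 < st.2 then st.2 else st.1), st.2 + 1) else (st.1, 0))
        (-1, trailRun arr t arr.length)).1)
    ∧ (∃ p, p < arr.length ∧ arr.getD p 0 = t ∧
      (arr.foldl (fun (st : Int × Int) x =>
        if x = t then ((if st.1 < st.2 then st.2 else st.1), st.2 + 1) else (st.1, 0))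
        (-1, trailRun arr t arr.length)).1 = cC arr t p) := by
  rw [foldl_index arr _ _]
  have main : ∀ m, m ≤ arr.length →
      ((List.range m).foldl (fun (st : Int × Int) j =>
        if arr.getD j 0 = t then ((if st.1 < st.2 then st.2 else st.1), st.2 + 1) else (st.1, 0))
        (-1, trailRun arr t arr.length)).2 = runR arr t m
      ∧ (∀ p, p < m → arr.getD p 0 = t →
          cC arr t p ≤ ((List.range m).foldl (fun (st : Int × Int) j =>
            if arr.getD j 0 = t then ((if st.1 < st.2 then st.2 else st.1), st.2 + 1) else (st.1, 0))
            (-1, trailRun arr t arr.length)).1)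
      ∧ (((List.range m).foldl (fun (st : Int × Int) j =>
            if arr.getD j 0 = t then ((if st.1 < st.2 then st.2 else st.1), st.2 + 1) else (st.1, 0))
            (-1, trailRun arr t arr.length)).1 = -1
          ∨ ∃ p, p < m ∧ arr.getD p 0 = t ∧
            ((List.range m).foldl (fun (st : Int × Int) j =>
              if arr.getD j 0 = t then ((if st.1 < st.2 then st.2 else st.1), st.2 + 1) else (st.1, 0))
              (-1, trailRun arr t arr.length)).1 = cC arr t p) := by
    intro m
    induction m with
    | zero =>
      intro _
      refine ⟨rfl, fun p hp _ => absurd hp (by omega), Or.inl rfl⟩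
    | succ m ih =>
      intro hm
      obtain ⟨ih2, ihb, iha⟩ := ih (by omega)
      have hrc : runR arr t m = cC arr t m := runR_eq_cC arr t hEx m (by omega)
      have hc0 : 0 ≤ cC arr t m := cb_nonneg arr t (prevIdx arr.length m) (arr.length - 1)
      rw [List.range_succ, List.foldl_append, List.foldl_cons, List.foldl_nil]
      set S := (List.range m).foldl (fun (st : Int × Int) j =>
        if arr.getD j 0 = t then ((if st.1 < st.2 then st.2 else st.1), st.2 + 1) else (st.1, 0))
        (-1, trailRun arr t arr.length) with hS
      by_cases ht : arr.getD m 0 = t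
      · rw [if_pos ht]
        refine ⟨?_, ?_, ?_⟩
        · show S.2 + 1 = runR arr t (m + 1)
          rw [runR_succ, if_pos ht, ih2]
        · intro p hp hpt
          show cC arr t p ≤ if S.1 < S.2 then S.2 else S.1
          rcases Nat.lt_or_ge p m with hpm | hpm
          · have := ihb p hpm hpt
            split <;> omega
          · have hpm' : p = m := by omega
            subst hpm'
            rw [← hrc, ← ih2]
            split <;> omega
        · show (if S.1 < S.2 then S.2 else S.1) = -1 ∨ _
          by_cases hlt : S.1 < S.2
          · right
            exact ⟨m, by omega, ht, by rw [if_pos hlt, ih2, hrc]⟩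
          · rw [if_neg hlt]
            rcases iha with h | ⟨p, hp, hpt, he⟩
            · exfalso
              rw [h] at hlt
              rw [ih2, hrc] at hlt
              omega
            · right
              exact ⟨p, by omega, hpt, he⟩
      · rw [if_neg ht]
        refine ⟨?_, ?_, ?_⟩
        · show (0 : Int) = runR arr t (m + 1)
          rw [runR_succ, if_neg ht]
        · intro p hp hpt
          have hpm : p < m := by
            rcases Nat.lt_or_ge p m with h | h
            · exact h
            · exfalso; have : p = m := by omega
              exact ht (this ▸ hpt)
          exact ihb p hpm hpt
        · rcases iha with h | ⟨p, hp, hpt, he⟩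
          · exact Or.inl h
          · exact Or.inr ⟨p, by omega, hpt, he⟩
  obtain ⟨h2, hb, ha⟩ := main arr.length le_rfl
  refine ⟨hb, ?_⟩
  obtain ⟨p0, hp0, hp0t⟩ := hT
  rcases ha with h | ⟨p, hp, hpt, he⟩
  · exfalso
    have := hb p0 hp0 hp0t
    have hc0 : 0 ≤ cC arr t p0 := cb_nonneg arr t (prevIdx arr.length p0) (arr.length - 1)
    omega
  · exact ⟨p, hp, hpt, he⟩

theorem AB_eq (arr : List Int) (k : Int) (hPre : Pre_min_steps_to_equal arr k) :
    min_steps_to_equal arr k = min_steps_to_equal_alt arr k := by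
  unfold min_steps_to_equal min_steps_to_equal_alt
  by_cases h1 : (PySem.Set.ofList arr).length = 1
  · simp only [if_pos h1]
  by_cases h2 : ((PySem.Set.ofList arr).length : Int) = (arr.length : Int)
  · simp only [if_neg h1, if_pos h2]
  have hne : arr ≠ [] := by
    intro h
    subst h
    exact h2 rfl
  have hdst := two_distinct arr h1 hne
  have hk1 : k ≠ 1 := by
    rcases hPre with hall | hnd | hk1
    · obtain ⟨x, hx, y, hy, hxy⟩ := hdst
      exact absurd (hall x hx y hy) hxy
    · exact absurd (congrArg (fun l => ((List.length l : Int))) (PySem.Set.ofList_eq_self_of_nodup arr hnd)) h2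
    · exact hk1
  by_cases hk : k ≤ 0 ∨ (arr.length : Int) < k
  · have hk' : k ≤ 1 ∨ (arr.length : Int) < k := by
      rcases hk with h | h
      · exact Or.inl (by omega)
      · exact Or.inr h
    simp only [if_neg h1, if_neg h2, if_pos hk, if_pos hk']
  · obtain ⟨hka, hkb⟩ := not_or.mp hk
    have hk2 : 2 ≤ k := by omega
    have hk'' : ¬ (k ≤ 1 ∨ (arr.length : Int) < k) := by
      intro h
      rcases h with h | h
      · omega
      · exact hkb h
    simp only [if_neg h1, if_neg h2, if_neg hk, if_neg hk'']
    rw [show (List.foldl (fun (d : PySem.Dict Int Int) x => d.modify x 0 (· + 1)) PySem.Dict.empty arr)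
        = PySem.Dict.counter arr from rfl]
    rw [← target_eq arr]
    set t : Int := (List.foldl (fun b q => if b.2 < q.2 then q else b)
        (PySem.List.pyGetD (PySem.Dict.counter arr).items 0 (0, 0))
        (PySem.Dict.counter arr).items).1 with htdef
    have htmem : t ∈ arr := by
      rw [htdef]
      exact target_mem arr hne
    have hEx : ∃ q, q < arr.length ∧ arr.getD q 0 ≠ t := by
      obtain ⟨x, hx, y, hy, hxy⟩ := hdst
      by_cases hxt : x = t
      · obtain ⟨j, hj, hje⟩ := List.mem_iff_getElem.mp hy
        refine ⟨j, hj, ?_⟩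
        rw [List.getD_eq_getElem arr 0 (n := j) hj, hje]
        intro hc
        exact hxy (by rw [hxt, ← hc])
      · obtain ⟨j, hj, hje⟩ := List.mem_iff_getElem.mp hx
        refine ⟨j, hj, ?_⟩
        rw [List.getD_eq_getElem arr 0 (n := j) hj, hje]
        exact hxt
    have hT : ∃ p, p < arr.length ∧ arr.getD p 0 = t := by
      obtain ⟨j, hj, hje⟩ := List.mem_iff_getElem.mp htmem
      exact ⟨j, hj, by rw [List.getD_eq_getElem arr 0 (n := j) hj, hje]⟩
    obtain ⟨hub, p1, hp1, hp1t, hbest⟩ := scan_spec arr t hEx hT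
    rw [hbest]
    set P := List.map (fun p => p.1) (List.filter (fun p => p.2 == t) (PySem.List.enumerate arr)) with hPdef
    obtain ⟨p0, hp0, hp0t⟩ := hT
    have hq0 : ((p0 : Int)) ∈ P := by
      rw [hPdef]
      exact (mem_positions arr t _).mpr ⟨p0, hp0, rfl, hp0t⟩
    cases hpos : P with
    | nil =>
      rw [hpos] at hq0
      cases hq0
    | cons q qs =>
      simp only [List.foldl_cons, Option.elim_none]
      simp only [optfold_eq]
      simp only [Option.elim_some]
      have hmemP : ∀ x, x ∈ q :: qs → ∃ j : Nat, j < arr.length ∧ x = (j : Int) ∧ arr.getD j 0 = t := by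
        intro x hx
        rw [← hpos, hPdef] at hx
        exact (mem_positions arr t x).mp hx
      have hm1 : ((p1 : Int)) ∈ q :: qs := by
        rw [← hpos, hPdef]
        exact (mem_positions arr t _).mpr ⟨p1, hp1, rfl, hp1t⟩
      apply le_antisymm
      · rcases List.mem_cons.mp hm1 with hq | hq
        · rw [← hq, inner_eq arr t k hk2 hEx p1 hp1 hp1t]
          exact foldmin_le_init _ qs _
        · refine le_trans (foldmin_le_mem _ qs _ _ hq) ?_
          simp only [inner_eq arr t k hk2 hEx p1 hp1 hp1t]
          exact le_refl _
      · refine foldmin_lb _ qs _ _ ?_ ?_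
        · obtain ⟨j, hj, hqe, hjt⟩ := hmemP q List.mem_cons_self
          rw [hqe]
          simp only [inner_eq arr t k hk2 hEx j hj hjt]
          refine fB_mono k _ _ hk2 ?_
          have := hub j hj hjt
          rw [hbest] at this
          omega
        · intro x hx
          obtain ⟨j, hj, hxe, hjt⟩ := hmemP x (List.mem_cons_of_mem _ hx)
          rw [hxe]
          simp only [inner_eq arr t k hk2 hEx j hj hjt]
          refine fB_mono k _ _ hk2 ?_
          have := hub j hj hjt
          rw [hbest] at this
          omega

-- ===== VERDICT (by name: the statement is the Claim_ definition above) =====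
theorem min_steps_to_equal_spec : Claim_equal_min_steps_to_equal := by
  intro arr k _ hPre
  unfold Spec_min_steps_to_equal
  exact AB_eq arr k hPre

@[simp]
theorem min_steps_to_equal_raises : Claim_raises_min_steps_to_equal := by
  unfold Claim_raises_min_steps_to_equal
  refine ⟨?_, by decide⟩
  intro arr k _ hR hPre
  rcases hR with ⟨hk, hall, hnd⟩
  rcases hPre with h | h | h
  · exact hall h
  · exact hnd h
  · exact h hk
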